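-- pv_equiv track=rewrite | github.com/saxena-codes/ProjectEuler | Problem4-Largest-Palindrome-Product.py | check_three_digit_multiples
-- ===== SOURCE A (Python) =====
-- def check_three_digit_multiples(number):
--
--     output = None
--
--     count_1 = 999
--     while count_1 > 99:
--
--         count_2 = 999
--         while count_2 > 99:
--             if count_1*count_2 == number:
--                 output = [count_1, count_2]
--                 break
--             count_2 -= 1
--
--         if output:
--             break
--         count_1 -= 1
--
--     return output
-- ===== SOURCE B (Python) =====
-- def check_three_digit_multiples(number):
--     # Single pass over candidate first factors: use divisibility and a
--     # quotient-range check instead of scanning all second factors.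
--     for count_1 in range(999, 99, -1):
--         if number % count_1 == 0:
--             q = number // count_1
--             if 100 <= q <= 999:
--                 return [count_1, q]
--     return None
-- ===== Notes on version B (the rewrite author's own statement) =====
-- stated objective: faster
-- what changed: Replaced the nested 900x900 scan over both factors with a single descending loop over the first factor that checks divisibility and that the quotient is three-digit.
import Mathlib
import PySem

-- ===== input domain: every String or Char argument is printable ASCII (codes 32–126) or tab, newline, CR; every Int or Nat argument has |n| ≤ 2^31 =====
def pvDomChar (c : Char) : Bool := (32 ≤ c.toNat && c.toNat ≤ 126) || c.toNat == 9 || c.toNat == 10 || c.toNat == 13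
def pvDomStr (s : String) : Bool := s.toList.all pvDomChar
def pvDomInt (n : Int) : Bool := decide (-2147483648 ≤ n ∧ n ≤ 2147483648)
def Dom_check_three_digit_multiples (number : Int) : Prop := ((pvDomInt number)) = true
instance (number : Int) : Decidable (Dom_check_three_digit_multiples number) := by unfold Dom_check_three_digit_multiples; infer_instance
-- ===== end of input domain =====

-- B replaces A's nested scan over both factors by a single descending loop over the
-- first factor with a divisibility + quotient-range test (asymptotically fewer steps).

-- ===== PORT A =====
-- inner 'while count_2 > 99' loop; fuel bounds the countdown (1000 ≥ the 900 steps taken)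
def pyInnerA (number count_1 : Int) : Nat → Int → Option (List Int)
  | 0, _ => none
  | fuel + 1, count_2 =>
    if count_2 > 99 then
      if count_1 * count_2 = number then some [count_1, count_2]
      else pyInnerA number count_1 fuel (count_2 - 1)
    else none

-- outer 'while count_1 > 99' loop ('if output: break' = return the inner hit at once)
def pyOuterA (number : Int) : Nat → Int → Option (List Int)
  | 0, _ => none
  | fuel + 1, count_1 =>
    if count_1 > 99 then
      match pyInnerA number count_1 1000 999 with
      | some out => some out
      | none => pyOuterA number fuel (count_1 - 1)
    else none

def check_three_digit_multiples (number : Int) : Option (List Int) :=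
  pyOuterA number 1000 999

-- ===== PORT B =====
-- 'for count_1 in range(999, 99, -1)' with early return
def altLoopB (number : Int) : List Int → Option (List Int)
  | [] => none
  | count_1 :: rest =>
    if PySem.Int.mod number count_1 = 0 then
      let q := PySem.Int.floordiv number count_1
      if 100 ≤ q ∧ q ≤ 999 then some [count_1, q] else altLoopB number rest
    else altLoopB number rest

def check_three_digit_multiples_alt (number : Int) : Option (List Int) :=
  altLoopB number (PySem.List.pyRange 999 99 (-1))

-- ===== PRECONDITION & SPEC =====
def Spec_check_three_digit_multiples (number : Int) (out : Option (List Int)) : Prop := out = check_three_digit_multiples_alt number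
instance (number : Int) (out : Option (List Int)) : Decidable (Spec_check_three_digit_multiples number out) := by unfold Spec_check_three_digit_multiples; infer_instance

-- ===== CLAIM (what is proved, stated in full; the proofs are below) =====
def Claim_equal_check_three_digit_multiples : Prop := ∀ (number : Int), Dom_check_three_digit_multiples number → Spec_check_three_digit_multiples number (check_three_digit_multiples number)

-- ===== LEMMAS AND PROOFS =====

-- A's inner loop finds the (unique) count_2 with count_1*count_2 = number, i.e. the
-- floordiv quotient, iff count_1 divides number and the quotient lies in [100, c2].
lemma pyInnerA_eq (number c1 : Int) (h1 : 0 < c1) :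
    ∀ (fuel : Nat) (c2 : Int), (c2 - 99).toNat ≤ fuel →
      pyInnerA number c1 fuel c2 =
        (if c1 ∣ number ∧ 100 ≤ PySem.Int.floordiv number c1 ∧ PySem.Int.floordiv number c1 ≤ c2
         then some [c1, PySem.Int.floordiv number c1] else none) := by
  intro fuel
  induction fuel with
  | zero =>
    intro c2 hf
    simp only [pyInnerA]
    rw [if_neg]
    rintro ⟨_, _, _⟩; omega
  | succ f ih =>
    intro c2 hf
    set q := PySem.Int.floordiv number c1 with hqdef
    simp only [pyInnerA]
    by_cases hc2 : c2 > 99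
    · rw [if_pos hc2]
      by_cases hhit : c1 * c2 = number
      · rw [if_pos hhit]
        have hdvd : c1 ∣ number := ⟨c2, hhit.symm⟩
        have hq : q = c2 := by
          have hm : PySem.Int.mod number c1 = 0 :=
            (PySem.Int.mod_eq_zero_iff_dvd number c1).mpr hdvd
          have := PySem.Int.floordiv_mul_add_mod number c1
          rw [hm, add_zero] at this
          -- q * c1 = number = c1 * c2
          have : q * c1 = c1 * c2 := by rw [this, hhit]
          have h2 : q * c1 = c2 * c1 := by linarith [mul_comm c1 c2, this]
          exact mul_right_cancel₀ (by omega) h2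
        rw [if_pos ⟨hdvd, by omega, by omega⟩, hq]
      · rw [if_neg hhit, ih (c2 - 1) (by omega)]
        by_cases hcond : c1 ∣ number ∧ 100 ≤ q ∧ q ≤ c2 - 1
        · rw [if_pos hcond, if_pos ⟨hcond.1, hcond.2.1, by omega⟩]
        · rw [if_neg hcond, if_neg]
          rintro ⟨hdvd, hlo, hhi⟩
          apply hcond
          refine ⟨hdvd, hlo, ?_⟩
          -- q ≠ c2, since c1 * q = number but c1 * c2 ≠ number
          have hm : PySem.Int.mod number c1 = 0 :=
            (PySem.Int.mod_eq_zero_iff_dvd number c1).mpr hdvd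
          have hmul := PySem.Int.floordiv_mul_add_mod number c1
          rw [hm, add_zero] at hmul
          have hne : q ≠ c2 := by
            intro heq
            apply hhit
            rw [← heq, mul_comm]; exact hmul
          omega
    · rw [if_neg hc2, if_neg]
      rintro ⟨_, hlo, hhi⟩; omega

-- The two loops agree step by step down the shared countdown of count_1.
lemma loops_eq (number : Int) :
    ∀ (fuel : Nat) (c1 : Int), c1 ≤ 999 → (c1 - 99).toNat ≤ fuel →
      pyOuterA number fuel c1 = altLoopB number (PySem.List.pyRange c1 99 (-1)) := by
  intro fuel
  induction fuel with
  | zero =>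
    intro c1 _ hf
    rw [PySem.List.pyRange_neg_one_eq_nil (by omega)]
    simp [pyOuterA, altLoopB]
  | succ f ih =>
    intro c1 hle hf
    by_cases hc1 : c1 > 99
    · rw [PySem.List.pyRange_neg_one_cons (by omega)]
      simp only [pyOuterA, altLoopB, if_pos hc1]
      rw [pyInnerA_eq number c1 (by omega) 1000 999 (by omega)]
      set q := PySem.Int.floordiv number c1 with hqdef
      by_cases hm : PySem.Int.mod number c1 = 0
      · have hdvd : c1 ∣ number := (PySem.Int.mod_eq_zero_iff_dvd number c1).mp hm
        rw [if_pos hm]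
        by_cases hq : 100 ≤ q ∧ q ≤ 999
        · rw [if_pos ⟨hdvd, hq.1, hq.2⟩, if_pos hq]
        · rw [if_neg (by rintro ⟨_, h1, h2⟩; exact hq ⟨h1, h2⟩), if_neg hq]
          exact ih (c1 - 1) (by omega) (by omega)
      · have hndvd : ¬ c1 ∣ number := fun h =>
          hm ((PySem.Int.mod_eq_zero_iff_dvd number c1).mpr h)
        rw [if_neg hm, if_neg (by rintro ⟨h, _, _⟩; exact hndvd h)]
        exact ih (c1 - 1) (by omega) (by omega)
    · rw [PySem.List.pyRange_neg_one_eq_nil (by omega)]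
      simp [pyOuterA, altLoopB, if_neg hc1]

-- ===== VERDICT (by name: the statement is the Claim_ definition above) =====
theorem check_three_digit_multiples_spec : Claim_equal_check_three_digit_multiples := by
  intro number _
  unfold Spec_check_three_digit_multiples check_three_digit_multiples check_three_digit_multiples_alt
  exact loops_eq number 1000 999 (by omega) (by omega)
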